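-- pv_equiv track=rewrite | github.com/Ibrahim-bel/AI_player_Gopher_and_Dodo | Utilitaires/hexMap.py | generateHexMap
-- ===== SOURCE A (Python) =====
-- import collections
-- from typing import Dict, List
--
-- Cell = collections.namedtuple("Cell", ["q", "r"])
--
-- HexMap = Dict[Cell, int]
--
-- def generateHexMap(N: int) -> HexMap:
--     hexMap = {}
--     for q in range(-N, N+1):
--         r1 = max(-N, q - N)
--         r2 = min(N, q + N)
--         for r in range(r1, r2+1):
--             cell = Cell(q, r)
--             hexMap[cell] = 0
--     return hexMap
-- ===== SOURCE B (Python) =====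
-- import collections
--
-- Cell = collections.namedtuple("Cell", ["q", "r"])
--
--
-- def generateHexMap(N: int):
--     # Hexagon = center cell + three 120-degree rotated copies of an N x (N+1)
--     # rectangular patch; collect the cells, sort, and build the dict directly.
--     if N < 0:
--         return {}
--     cells = [Cell(0, 0)]
--     for a in range(1, N + 1):
--         cells.extend([Cell(a, b) for b in range(N + 1)])            # fundamental patch
--         cells.extend([Cell(-b, a - b) for b in range(N + 1)])       # rotated 120 degrees
--         cells.extend([Cell(b - a, -a) for b in range(N + 1)])       # rotated 240 degrees
--     cells.sort()
--     return dict.fromkeys(cells, 0)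
-- ===== Notes on version B (the rewrite author's own statement) =====
-- stated objective: alternative
-- what changed: Instead of row-by-row clamped scanning, B exploits the hexagon's 3-fold rotational symmetry: it generates the center cell plus three 120-degree rotated copies of one unclamped N x (N+1) rectangular patch, sorts the collected cells, and builds the dict with dict.fromkeys.
import Mathlib
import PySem

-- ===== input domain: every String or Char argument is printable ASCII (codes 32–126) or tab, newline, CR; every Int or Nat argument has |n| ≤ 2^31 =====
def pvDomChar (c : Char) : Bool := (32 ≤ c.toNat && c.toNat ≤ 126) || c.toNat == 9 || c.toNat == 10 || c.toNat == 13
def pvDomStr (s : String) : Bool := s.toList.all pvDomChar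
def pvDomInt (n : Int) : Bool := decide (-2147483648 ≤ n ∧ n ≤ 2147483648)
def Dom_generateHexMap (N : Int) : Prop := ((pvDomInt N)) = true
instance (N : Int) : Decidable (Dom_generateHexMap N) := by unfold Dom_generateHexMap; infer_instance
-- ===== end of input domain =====

-- B replaces A's row-by-row clamped scan by a different construction: the hexagon's 3-fold
-- rotational symmetry gives it as the center cell plus three 120°-rotated copies of one
-- unclamped N×(N+1) rectangular patch; the collected cells are sorted and turned into the dict.


-- ===== PORT A =====
-- the dict {Cell(q,r): 0, …} is returned, per the type convention, as its items list with the
-- tuple key flattened: ((q,r),0) ↦ (q,r,0)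
def generateHexMap (N : Int) : List (Int × Int × Int) :=
  let hexMap : PySem.Dict (Int × Int) Int :=
    (PySem.List.pyRange (-N) (N+1) 1).foldl (fun hexMap q =>
      let r1 := max (-N) (q - N)
      let r2 := min N (q + N)
      (PySem.List.pyRange r1 (r2+1) 1).foldl (fun m r => m.insert (q, r) 0) hexMap)
      PySem.Dict.empty
  hexMap.items.map (fun p => (p.1.1, p.1.2, p.2))

-- ===== PORT B =====
def generateHexMap_alt (N : Int) : List (Int × Int × Int) :=
  if N < 0 then []
  else
    let cells : List (Int × Int) :=
      (PySem.List.pyRange 1 (N+1) 1).foldl (fun cs a =>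
        ((cs ++ (PySem.List.pyRange 0 (N+1) 1).map (fun b => (a, b)))
            ++ (PySem.List.pyRange 0 (N+1) 1).map (fun b => (-b, a - b)))
            ++ (PySem.List.pyRange 0 (N+1) 1).map (fun b => (b - a, -a)))
        [((0:Int), (0:Int))]
    -- cells.sort(): Python compares tuples lexicographically, which is exactly toLex's order
    let sortedCells := PySem.List.sorted cells (fun c => toLex c) false
    -- dict.fromkeys(cells, 0)
    let d := sortedCells.foldl (fun m c => m.insert c (0:Int)) PySem.Dict.empty
    d.items.map (fun p => (p.1.1, p.1.2, p.2))

-- ===== PRECONDITION & SPEC =====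
def Spec_generateHexMap (N : Int) (out : List (Int × Int × Int)) : Prop := out = generateHexMap_alt N
instance (N : Int) (out : List (Int × Int × Int)) : Decidable (Spec_generateHexMap N out) := by unfold Spec_generateHexMap; infer_instance

-- ===== CLAIM (what is proved, stated in full; the proofs are below) =====
def Claim_equal_generateHexMap : Prop := ∀ (N : Int), Dom_generateHexMap N → Spec_generateHexMap N (generateHexMap N)

-- ===== LEMMAS AND PROOFS =====

-- A's key order: row-major, r ascending within each row.
def hexRow (N q : Int) : List (Int × Int) :=
  (PySem.List.pyRange (max (-N) (q - N)) (min N (q + N) + 1) 1).map (fun r => (q, r))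

def rowKeys (N : Int) : List (Int × Int) :=
  (PySem.List.pyRange (-N) (N+1) 1).flatMap (hexRow N)

-- the three rotated patch slices B appends for one value of a
def rowP (N a : Int) : List (Int × Int) :=
  (PySem.List.pyRange 0 (N+1) 1).map (fun b => (a, b))
    ++ (PySem.List.pyRange 0 (N+1) 1).map (fun b => (-b, a - b))
    ++ (PySem.List.pyRange 0 (N+1) 1).map (fun b => (b - a, -a))

def cellsFlat (N : Int) : List (Int × Int) :=
  ((0:Int), (0:Int)) :: (PySem.List.pyRange 1 (N+1) 1).flatMap (rowP N)

theorem mem_rowP (N a : Int) (x : Int × Int) :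
    x ∈ rowP N a ↔ ∃ b, 0 ≤ b ∧ b ≤ N ∧
      (x = (a, b) ∨ x = (-b, a - b) ∨ x = (b - a, -a)) := by
  unfold rowP
  simp only [List.mem_append, List.mem_map, PySem.List.mem_pyRange_one]
  constructor
  · rintro ((⟨b, hb, rfl⟩ | ⟨b, hb, rfl⟩) | ⟨b, hb, rfl⟩)
    · exact ⟨b, by omega, by omega, Or.inl rfl⟩
    · exact ⟨b, by omega, by omega, Or.inr (Or.inl rfl)⟩
    · exact ⟨b, by omega, by omega, Or.inr (Or.inr rfl)⟩
  · rintro ⟨b, h0, h1, (rfl | rfl | rfl)⟩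
    · exact Or.inl (Or.inl ⟨b, by omega, rfl⟩)
    · exact Or.inl (Or.inr ⟨b, by omega, rfl⟩)
    · exact Or.inr ⟨b, by omega, rfl⟩

theorem mem_rowKeys (N : Int) (c : Int × Int) :
    c ∈ rowKeys N ↔ (-N ≤ c.1 ∧ c.1 ≤ N ∧ -N ≤ c.2 ∧ c.2 ≤ N ∧
      -N ≤ c.1 - c.2 ∧ c.1 - c.2 ≤ N) := by
  obtain ⟨q, r⟩ := c
  simp only [rowKeys, hexRow, List.mem_flatMap, List.mem_map, PySem.List.mem_pyRange_one,
    Prod.mk.injEq]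
  constructor
  · rintro ⟨x, hx, y, hy, rfl, rfl⟩; omega
  · intro h
    exact ⟨q, by omega, r, by omega, rfl, rfl⟩

theorem mem_cellsFlat (N : Int) (hN : 0 ≤ N) (c : Int × Int) :
    c ∈ cellsFlat N ↔ (-N ≤ c.1 ∧ c.1 ≤ N ∧ -N ≤ c.2 ∧ c.2 ≤ N ∧
      -N ≤ c.1 - c.2 ∧ c.1 - c.2 ≤ N) := by
  obtain ⟨q, r⟩ := c
  simp only [cellsFlat, List.mem_cons, List.mem_flatMap, PySem.List.mem_pyRange_one,
    mem_rowP, Prod.mk.injEq]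
  constructor
  · rintro (⟨rfl, rfl⟩ | ⟨a, ha, b, hb0, hbN, hm⟩)
    · omega
    · omega
  · intro h
    by_cases h0 : q = 0 ∧ r = 0
    · exact Or.inl ⟨h0.1, h0.2⟩
    · right
      by_cases h1 : 1 ≤ q ∧ 0 ≤ r
      · exact ⟨q, ⟨by omega, by omega⟩, r, by omega, by omega, Or.inl ⟨rfl, rfl⟩⟩
      · by_cases h2 : q ≤ 0 ∧ q + 1 ≤ r
        · refine ⟨r - q, ⟨by omega, by omega⟩, -q, by omega, by omega, ?_⟩
          refine Or.inr (Or.inl ⟨by omega, by omega⟩)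
        · refine ⟨-r, ⟨by omega, by omega⟩, q - r, by omega, by omega, ?_⟩
          refine Or.inr (Or.inr ⟨by omega, by omega⟩)

theorem rowKeys_pairwise (N : Int) :
    (rowKeys N).Pairwise (fun a b => toLex a < toLex b) := by
  unfold rowKeys
  rw [List.pairwise_flatMap]
  constructor
  · intro q _
    unfold hexRow
    rw [List.pairwise_map]
    refine (PySem.List.pairwise_lt_pyRange_one _ _).imp ?_
    intro r r' h
    exact Prod.Lex.lt_iff.mpr (Or.inr ⟨rfl, h⟩)
  · refine List.Pairwise.imp_of_mem ?_ (PySem.List.pairwise_lt_pyRange_one (-N) (N+1))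
    intro q q' _ _ hlt x hx y hy
    simp only [hexRow, List.mem_map] at hx hy
    obtain ⟨r, _, rfl⟩ := hx
    obtain ⟨r', _, rfl⟩ := hy
    exact Prod.Lex.lt_iff.mpr (Or.inl hlt)

theorem rowKeys_nodup (N : Int) : (rowKeys N).Nodup := by
  refine List.Pairwise.imp ?_ (rowKeys_pairwise N)
  intro a b h hab
  subst hab
  exact lt_irrefl _ h

theorem map_patch_nodup (l : List Int) (hl : l.Nodup) (f : Int → Int × Int)
    (hf : ∀ b b', f b = f b' → b = b') : (l.map f).Nodup := by
  refine List.Nodup.map ?_ hl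
  intro b b' h
  exact hf b b' h

theorem rowP_nodup (N a : Int) (ha : 1 ≤ a) : (rowP N a).Nodup := by
  unfold rowP
  rw [List.nodup_append, List.nodup_append]
  refine ⟨⟨?_, ?_, ?_⟩, ?_, ?_⟩
  · refine map_patch_nodup _ (PySem.List.nodup_pyRange_one _ _) _ ?_
    intro b b' h; simp only [Prod.mk.injEq] at h; omega
  · refine map_patch_nodup _ (PySem.List.nodup_pyRange_one _ _) _ ?_
    intro b b' h; simp only [Prod.mk.injEq] at h; omega
  · -- patch 1 disjoint from patch 2: q = a ≥ 1 there vs q = -b ≤ 0 here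
    intro x hx y hy heq
    subst heq
    simp only [List.mem_map, PySem.List.mem_pyRange_one] at hx hy
    obtain ⟨b, hb, rfl⟩ := hx
    obtain ⟨b', hb', heq2⟩ := hy
    simp only [Prod.mk.injEq] at heq2
    omega
  · refine map_patch_nodup _ (PySem.List.nodup_pyRange_one _ _) _ ?_
    intro b b' h; simp only [Prod.mk.injEq] at h; omega
  · -- patches 1,2 disjoint from patch 3: r ≥ 0 / r - q = a ≥ 1 there vs r = -a ≤ -1 here
    intro x hx y hy heq
    subst heq
    simp only [List.mem_append, List.mem_map, PySem.List.mem_pyRange_one] at hx hy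
    obtain ⟨b, hb, rfl⟩ := hy
    rcases hx with ⟨b', hb', heq2⟩ | ⟨b', hb', heq2⟩ <;>
      (simp only [Prod.mk.injEq] at heq2; omega)

theorem cellsFlat_nodup (N : Int) : (cellsFlat N).Nodup := by
  unfold cellsFlat
  rw [List.nodup_cons]
  constructor
  · intro hmem
    rw [List.mem_flatMap] at hmem
    obtain ⟨a, ha, hm⟩ := hmem
    rw [PySem.List.mem_pyRange_one] at ha
    rw [mem_rowP] at hm
    obtain ⟨b, hb0, hbN, h⟩ := hm
    simp only [Prod.mk.injEq] at h
    omega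
  · show List.Pairwise (fun a b => a ≠ b) _
    rw [List.pairwise_flatMap]
    constructor
    · intro a ha
      rw [PySem.List.mem_pyRange_one] at ha
      exact rowP_nodup N a (by omega)
    · refine List.Pairwise.imp_of_mem ?_ (PySem.List.pairwise_lt_pyRange_one 1 (N+1))
      intro a a' ha ha' hlt x hx y hy heq
      rw [PySem.List.mem_pyRange_one] at ha ha'
      rw [mem_rowP] at hx hy
      obtain ⟨b, hb0, hbN, hxm⟩ := hx
      obtain ⟨b', hb0', hbN', hym⟩ := hy
      subst heq
      rcases hxm with rfl | rfl | rfl <;> rcases hym with heq | heq | heq <;>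
        (simp only [Prod.mk.injEq] at heq; omega)

theorem rowKeys_perm_cellsFlat (N : Int) (hN : 0 ≤ N) :
    (rowKeys N).Perm (cellsFlat N) := by
  refine (List.perm_ext_iff_of_nodup (rowKeys_nodup N) (cellsFlat_nodup N)).mpr ?_
  intro c
  rw [mem_rowKeys, mem_cellsFlat N hN]

theorem sorted_cellsFlat (N : Int) (hN : 0 ≤ N) :
    PySem.List.sorted (cellsFlat N) (fun c => toLex c) false = rowKeys N :=
  PySem.List.sorted_eq_of_perm_of_pairwise_lt _ _ _ (rowKeys_perm_cellsFlat N hN)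
    (rowKeys_pairwise N)

-- building a dict by inserting a Nodup list of fresh keys, then flattening its items
theorem items_of_key_fold (ks : List (Int × Int)) (h : ks.Nodup) :
    ((ks.foldl (fun m c => m.insert c (0:Int)) PySem.Dict.empty).items).map
        (fun p => (p.1.1, p.1.2, p.2))
      = ks.map (fun c => (c.1, c.2, (0:Int))) := by
  have h1 : ∀ c ∈ ks, (PySem.Dict.empty : PySem.Dict (Int × Int) Int).contains
      ((fun c => c) c) = false := by
    intro c _
    simp [PySem.Dict.contains_empty]
  have h2 : (ks.map (fun c => c)).Nodup := by simpa using h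
  have h3 := PySem.Dict.items_foldl_insert_fresh ks (fun c => c) (fun _ => (0:Int))
    PySem.Dict.empty h1 h2
  have h4 : (ks.foldl (fun m c => m.insert c (0:Int)) PySem.Dict.empty).items
      = (PySem.Dict.empty : PySem.Dict (Int × Int) Int).items
        ++ ks.map (fun a => (a, (0:Int))) := h3
  rw [h4]
  rw [show (PySem.Dict.empty : PySem.Dict (Int × Int) Int).items = [] from rfl,
    List.nil_append, List.map_map]
  rfl

theorem portA_eq_rowKeys (N : Int) :
    generateHexMap N = (rowKeys N).map (fun c => (c.1, c.2, (0:Int))) := by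
  have h : generateHexMap N
      = ((rowKeys N).foldl (fun m c => m.insert c (0:Int)) PySem.Dict.empty).items.map
          (fun p => (p.1.1, p.1.2, p.2)) := by
    unfold generateHexMap rowKeys hexRow
    simp only [List.foldl_flatMap, List.foldl_map]
  rw [h, items_of_key_fold _ (rowKeys_nodup N)]

theorem portB_cells (N : Int) :
    (PySem.List.pyRange 1 (N+1) 1).foldl (fun cs a =>
        ((cs ++ (PySem.List.pyRange 0 (N+1) 1).map (fun b => (a, b)))
            ++ (PySem.List.pyRange 0 (N+1) 1).map (fun b => (-b, a - b)))
            ++ (PySem.List.pyRange 0 (N+1) 1).map (fun b => (b - a, -a))) [((0:Int), (0:Int))]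
      = cellsFlat N := by
  have h1 : ∀ (cs : List (Int × Int)) (a : Int),
      ((cs ++ (PySem.List.pyRange 0 (N+1) 1).map (fun b => (a, b)))
          ++ (PySem.List.pyRange 0 (N+1) 1).map (fun b => (-b, a - b)))
          ++ (PySem.List.pyRange 0 (N+1) 1).map (fun b => (b - a, -a))
        = cs ++ rowP N a := by
    intro cs a
    simp [rowP, List.append_assoc]
  simp only [h1]
  rw [PySem.List.foldl_append_eq_flatMap]
  rfl

-- ===== VERDICT (by name: the statement is the Claim_ definition above) =====
theorem generateHexMap_spec : Claim_equal_generateHexMap := by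
  intro N _
  unfold Spec_generateHexMap
  rw [portA_eq_rowKeys]
  by_cases hN : N < 0
  · have hrow : rowKeys N = [] := by
      unfold rowKeys
      rw [PySem.List.pyRange_one_eq_nil (by omega)]
      rfl
    rw [hrow]
    unfold generateHexMap_alt
    rw [if_pos hN]
    rfl
  · unfold generateHexMap_alt
    rw [if_neg hN]
    simp only [portB_cells, sorted_cellsFlat N (by omega)]
    rw [items_of_key_fold _ (rowKeys_nodup N)]
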